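-- pv_equiv track=rewrite | github.com/dmitrymarov/silver-journey-test | gigacheck/data_scripts/detection/load_coauthor_data.py | get_ai_word_intervals
-- ===== SOURCE A (Python) =====
-- from typing import Any, Dict, List, Tuple
--
-- def get_ai_word_intervals(text: str, mask: str) -> List[List[int]]:
--     intervals = []
--     current_word_start = None
--     in_ai_word = False
--
--     for i, char in enumerate(text):
--         if char == " ":
--             if in_ai_word:
--                 intervals.append([current_word_start, i - 1])
--                 in_ai_word = False
--             current_word_start = None
--         else:
--             if mask[i] == "A":
--                 if not in_ai_word:
--                     current_word_start = i if current_word_start is None else current_word_start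
--                 in_ai_word = True
--             elif in_ai_word and char != " ":
--                 intervals.append([current_word_start, i - 1])
--                 in_ai_word = False
--                 current_word_start = None
--
--     if in_ai_word and current_word_start is not None:
--         intervals.append([current_word_start, len(text) - 1])
--
--     return intervals
-- ===== SOURCE B (Python) =====
-- def get_ai_word_intervals(text, mask):
--     n = len(text)
--     flags = [text[i] != " " and mask[i] == "A" for i in range(n)]
--     starts = [i for i in range(n) if flags[i] and (i == 0 or not flags[i - 1])]
--     ends = [i for i in range(n) if flags[i] and (i == n - 1 or not flags[i + 1])]
--     return [[s, e] for s, e in zip(starts, ends)]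
-- ===== Notes on version B (the rewrite author's own statement) =====
-- stated objective: alternative
-- what changed: Replaces A's single-pass in_ai_word/current_word_start state machine with a build-then-scan decomposition: compute a boolean flag list, pick out run starts and run ends by boundary-detection comprehensions, and zip them into intervals.
import Mathlib
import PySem

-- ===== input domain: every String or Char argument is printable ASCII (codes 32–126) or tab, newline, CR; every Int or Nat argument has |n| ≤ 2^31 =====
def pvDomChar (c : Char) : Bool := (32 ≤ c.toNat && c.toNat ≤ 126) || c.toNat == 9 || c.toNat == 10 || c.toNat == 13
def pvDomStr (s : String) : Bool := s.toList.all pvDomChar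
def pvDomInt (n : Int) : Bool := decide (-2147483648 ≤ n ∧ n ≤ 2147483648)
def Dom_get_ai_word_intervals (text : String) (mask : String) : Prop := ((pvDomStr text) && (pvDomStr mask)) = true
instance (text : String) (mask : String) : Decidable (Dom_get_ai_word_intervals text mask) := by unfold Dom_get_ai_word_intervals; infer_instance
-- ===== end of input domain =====

-- B replaces A's in_ai_word/current_word_start state machine by a build-then-scan decomposition
-- (flag list, then boundary-detection comprehensions for run starts/ends, zipped); objective: alternative, same O(n) cost.

-- ===== PORT A =====
-- Literal transliteration of A's enumerate loop with state (intervals, current_word_start, in_ai_word).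
-- mask[i] is read via pyGetD (default ' '): Python raises IndexError when i ≥ len(mask) at a
-- non-space position; Pre_ excludes exactly those inputs.
def get_ai_word_intervals (text : String) (mask : String) : List (List Int) :=
  let t := text.toList
  let m := mask.toList
  let fin := (PySem.List.enumerate t).foldl
    (fun (st : List (List Int) × Option Int × Bool) (p : Int × Char) =>
      if p.2 = ' ' then
        ((if st.2.2 then st.1 ++ [[st.2.1.getD 0, p.1 - 1]] else st.1), none, false)
      else if PySem.List.pyGetD m p.1 ' ' = 'A' then
        (st.1, (if st.2.2 then st.2.1 else (if st.2.1 = none then some p.1 else st.2.1)), true)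
      else if st.2.2 then
        (st.1 ++ [[st.2.1.getD 0, p.1 - 1]], none, false)
      else
        (st.1, st.2.1, st.2.2))
    ([], none, false)
  if fin.2.2 ∧ fin.2.1 ≠ none then fin.1 ++ [[fin.2.1.getD 0, (t.length : Int) - 1]] else fin.1

-- ===== PORT B =====
-- Transliteration of Source B: flag list, boundary filters for starts/ends, zip.
-- (mask[i] read via getD, default ' ': Python raises where i ≥ len(mask) at a non-space position; Pre_ excludes those inputs.)
def get_ai_word_intervals_alt (text : String) (mask : String) : List (List Int) :=
  let t := text.toList
  let m := mask.toList
  let n := t.length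
  let flags := (List.range n).map (fun i => decide (t.getD i ' ' ≠ ' ') && decide (m.getD i ' ' = 'A'))
  let starts := (List.range n).filter (fun i => flags.getD i false && (decide (i = 0) || ! flags.getD (i - 1) false))
  let ends := (List.range n).filter (fun i => flags.getD i false && (decide (i = n - 1) || ! flags.getD (i + 1) false))
  (starts.zip ends).map (fun p => [(p.1 : Int), (p.2 : Int)])

-- ===== PRECONDITION & SPEC =====
-- Pre_ excludes exactly the inputs on which Python A raises IndexError: a position with a
-- non-space text character but no corresponding mask character.
def Pre_get_ai_word_intervals (text : String) (mask : String) : Prop :=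
  ∀ i < text.toList.length, text.toList.getD i ' ' ≠ ' ' → i < mask.toList.length
instance (text : String) (mask : String) : Decidable (Pre_get_ai_word_intervals text mask) := by
  unfold Pre_get_ai_word_intervals; infer_instance
def pvWitness_get_ai_word_intervals : String × String := ("ab c", "AA A")
def Spec_get_ai_word_intervals (text : String) (mask : String) (out : List (List Int)) : Prop := out = get_ai_word_intervals_alt text mask
instance (text : String) (mask : String) (out : List (List Int)) : Decidable (Spec_get_ai_word_intervals text mask out) := by unfold Spec_get_ai_word_intervals; infer_instance

-- ===== CLAIM (what is proved, stated in full; the proofs are below) =====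
def Claim_equal_get_ai_word_intervals : Prop := ∀ (text : String) (mask : String), Dom_get_ai_word_intervals text mask → Pre_get_ai_word_intervals text mask → Spec_get_ai_word_intervals text mask (get_ai_word_intervals text mask)

-- ===== LEMMAS AND PROOFS =====

-- The canonical flag: position i holds a non-space text character that is AI-masked
-- (automatically false for i ≥ text length, where the default ' ' is read back).
def pvFlag (t m : List Char) (i : Nat) : Bool :=
  decide (t.getD i ' ' ≠ ' ') && decide (m.getD i ' ' = 'A')

-- Abstract run machine over Nat indices: accumulator of closed runs + start of the open run.
def pvStep (f : Nat → Bool) (st : List (Nat × Nat) × Option Nat) (i : Nat) : List (Nat × Nat) × Option Nat :=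
  if f i then (st.1, some (st.2.getD i))
  else match st.2 with
    | some s => (st.1 ++ [(s, i - 1)], none)
    | none => (st.1, none)

def pvM (f : Nat → Bool) (n : Nat) : List (Nat × Nat) × Option Nat :=
  (List.range n).foldl (pvStep f) ([], none)

lemma pvM_succ (f : Nat → Bool) (n : Nat) : pvM f (n+1) = pvStep f (pvM f n) n := by
  simp [pvM, List.range_succ]

lemma pvM_isSome (f : Nat → Bool) (n : Nat) :
    (pvM f n).2.isSome = (decide (0 < n) && f (n-1)) := by
  induction n with
  | zero => simp [pvM]
  | succ k ih =>
    rw [pvM_succ]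
    by_cases h : f k = true
    · simp [pvStep, h]
    · simp only [Bool.not_eq_true] at h
      cases hc : (pvM f k).2 <;> simp [pvStep, h, hc]

lemma pvM_starts (f : Nat → Bool) (n : Nat) :
    (List.range n).filter (fun i => f i && (decide (i = 0) || ! f (i-1)))
      = (pvM f n).1.map Prod.fst ++ ((pvM f n).2).toList := by
  induction n with
  | zero => simp [pvM]
  | succ k ih =>
    rw [List.range_succ, List.filter_append, List.filter_singleton, ih, pvM_succ]
    have hs := pvM_isSome f k
    by_cases h : f k = true
    · cases hc : (pvM f k).2 with
      | none =>
        -- open run starts at k: cur = none forces k = 0 or ¬ f (k-1)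
        rw [hc] at hs; simp at hs
        have h0 : k = 0 ∨ f (k-1) = false := by
          by_cases hk0 : k = 0
          · exact Or.inl hk0
          · exact Or.inr (hs (Nat.pos_of_ne_zero hk0))
        have hcond : (decide (k = 0) || ! f (k-1)) = true := by
          rcases h0 with h1 | h1 <;> simp [h1]
        simp [pvStep, h, hcond, hc]
      | some s =>
        -- inside a run: f (k-1) is true and k > 0, so no new start
        rw [hc] at hs; simp at hs
        have hcond : (decide (k = 0) || ! f (k-1)) = false := by
          simp [hs.2]; omega
        simp [pvStep, h, hcond, hc]
    · simp only [Bool.not_eq_true] at h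
      cases hc : (pvM f k).2 <;> simp [pvStep, h, hc]

lemma pvM_ends (f : Nat → Bool) (n : Nat) :
    (List.range n).filter (fun i => f i && ! f (i+1))
      = (pvM f n).1.map Prod.snd ++ (if (pvM f n).2.isSome && ! f n then [n-1] else []) := by
  induction n with
  | zero => simp [pvM]
  | succ k ih =>
    rw [List.range_succ, List.filter_append, List.filter_singleton, ih, pvM_succ]
    by_cases h : f k = true
    · cases hc : (pvM f k).2 <;>
        · simp [pvStep, h, hc]
          cases f (k+1) <;> simp
    · simp only [Bool.not_eq_true] at h
      cases hc : (pvM f k).2 <;> simp [pvStep, h, hc]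

lemma pvZip_map_fst_snd (l : List (Nat × Nat)) :
    List.zip (l.map Prod.fst) (l.map Prod.snd) = l := by
  induction l with | nil => rfl | cons a t ih => simp [List.zip]

-- enumerate as a range map
lemma pvEnumerate_eq (t : List Char) (s : Int) :
    PySem.List.enumerate t s = (List.range t.length).map (fun (i : Nat) => (s + (i : Int), t.getD i ' ')) := by
  induction t generalizing s with
  | nil => simp [PySem.List.enumerate_nil]
  | cons c u ih =>
    rw [PySem.List.enumerate_cons, ih]
    rw [List.length_cons, List.range_succ_eq_map, List.map_cons, List.map_map]
    refine List.cons_eq_cons.mpr ⟨by simp, ?_⟩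
    apply List.map_congr_left
    intro i _
    simp only [Function.comp_apply, List.getD_cons_succ]
    refine Prod.ext ?_ rfl
    push_cast
    ring

lemma pvEnumerate_eq0 (t : List Char) :
    PySem.List.enumerate t = (List.range t.length).map (fun (i : Nat) => ((i : Int), t.getD i ' ')) := by
  rw [pvEnumerate_eq]
  simp

-- A's fold over the first n positions equals the machine (Int-cast state).
lemma pvA_fold (t m : List Char) (n : Nat) (hn : n ≤ t.length) :
    ((List.range n).map (fun (i : Nat) => ((i : Int), t.getD i ' '))).foldl
      (fun (st : List (List Int) × Option Int × Bool) (p : Int × Char) =>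
        if p.2 = ' ' then
          ((if st.2.2 then st.1 ++ [[st.2.1.getD 0, p.1 - 1]] else st.1), none, false)
        else if PySem.List.pyGetD m p.1 ' ' = 'A' then
          (st.1, (if st.2.2 then st.2.1 else (if st.2.1 = none then some p.1 else st.2.1)), true)
        else if st.2.2 then
          (st.1 ++ [[st.2.1.getD 0, p.1 - 1]], none, false)
        else
          (st.1, st.2.1, st.2.2))
      ([], none, false)
    = ((pvM (pvFlag t m) n).1.map (fun p => [(p.1 : Int), (p.2 : Int)]),
       (pvM (pvFlag t m) n).2.map (fun s => (s : Int)),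
       (pvM (pvFlag t m) n).2.isSome) := by
  induction n with
  | zero => simp [pvM]
  | succ k ih =>
    have hk : k < t.length := hn
    rw [List.range_succ, List.map_append, List.foldl_append, ih (Nat.le_of_lt hk), pvM_succ]
    have hget : PySem.List.pyGetD m ((k : Nat) : Int) ' ' = m[k]?.getD ' ' := by
      simp [PySem.List.pyGetD_natCast, List.getD]
    have hkpos : ∀ s, (pvM (pvFlag t m) k).2 = some s → 0 < k := by
      intro s hc
      have h2 := pvM_isSome (pvFlag t m) k
      rw [hc] at h2
      simp at h2
      omega
    by_cases hsp : t[k]?.getD ' ' = ' '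
    · cases hc : (pvM (pvFlag t m) k).2 with
      | none => simp [pvStep, pvFlag, hsp, hc]
      | some s =>
        have hcast : ((k : Int) - 1) = ((k - 1 : Nat) : Int) := by
          have := hkpos s hc; omega
        simp [pvStep, pvFlag, hsp, hc, hcast]
    · by_cases hA : m[k]?.getD ' ' = 'A'
      · cases hc : (pvM (pvFlag t m) k).2 <;> simp [pvStep, pvFlag, hsp, hA, hget, hc]
      · cases hc : (pvM (pvFlag t m) k).2 with
        | none => simp [pvStep, pvFlag, hsp, hA, hget, hc]
        | some s =>
          have hcast : ((k : Int) - 1) = ((k - 1 : Nat) : Int) := by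
            have := hkpos s hc; omega
          simp [pvStep, pvFlag, hsp, hA, hget, hc, hcast]

-- B's flag-list lookup is the canonical flag (false beyond the text either way).
lemma pvB_flag (t m : List Char) (j : Nat) :
    ((List.range t.length).map
        (fun i => decide (t.getD i ' ' ≠ ' ') && decide (m.getD i ' ' = 'A'))).getD j false
      = pvFlag t m j := by
  by_cases hj : j < t.length
  · rw [List.getD_eq_getElem _ _ (by simpa using hj)]
    simp [pvFlag]
  · rw [List.getD_eq_default _ _ (by simpa using Nat.le_of_not_lt hj)]
    have ht : t[j]? = none := by
      rw [List.getElem?_eq_none (Nat.le_of_not_lt hj)]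
    simp [pvFlag, List.getD, ht]

lemma pvFlag_top (t m : List Char) (j : Nat) (hj : t.length ≤ j) : pvFlag t m j = false := by
  have ht : t[j]? = none := by rw [List.getElem?_eq_none hj]
  simp [pvFlag, List.getD, ht]

-- ===== VERDICT (by name: the statement is the Claim_ definition above) =====
theorem get_ai_word_intervals_spec : Claim_equal_get_ai_word_intervals := by
  intro text mask _hdom _hpre
  simp only [Spec_get_ai_word_intervals, get_ai_word_intervals, get_ai_word_intervals_alt]
  generalize text.toList = t
  generalize mask.toList = m
  rw [pvEnumerate_eq0 t, pvA_fold t m t.length (le_refl _)]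
  -- rewrite B's filters to canonical filters of pvFlag
  rw [show ((List.range t.length).filter (fun i =>
        ((List.range t.length).map (fun i => decide (t.getD i ' ' ≠ ' ') && decide (m.getD i ' ' = 'A'))).getD i false
        && (decide (i = 0) || ! ((List.range t.length).map (fun i => decide (t.getD i ' ' ≠ ' ') && decide (m.getD i ' ' = 'A'))).getD (i - 1) false)))
      = (List.range t.length).filter (fun i => pvFlag t m i && (decide (i = 0) || ! pvFlag t m (i-1))) from by
    apply List.filter_congr
    intro i _
    rw [pvB_flag, pvB_flag]]
  rw [show ((List.range t.length).filter (fun i =>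
        ((List.range t.length).map (fun i => decide (t.getD i ' ' ≠ ' ') && decide (m.getD i ' ' = 'A'))).getD i false
        && (decide (i = t.length - 1) || ! ((List.range t.length).map (fun i => decide (t.getD i ' ' ≠ ' ') && decide (m.getD i ' ' = 'A'))).getD (i + 1) false)))
      = (List.range t.length).filter (fun i => pvFlag t m i && ! pvFlag t m (i+1)) from by
    apply List.filter_congr
    intro i hi
    rw [pvB_flag, pvB_flag]
    have hin : i < t.length := by simpa using hi
    rcases Nat.lt_or_ge (i+1) t.length with h | h
    · have hne : ¬ (i = t.length - 1) := by omega
      simp [hne]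
    · have hieq : i = t.length - 1 := by omega
      have hfo : pvFlag t m (t.length - 1 + 1) = false := by
        rw [show t.length - 1 + 1 = i + 1 from by omega]
        exact pvFlag_top t m (i+1) h
      simp [hieq, hfo]]
  rw [pvM_starts (pvFlag t m) t.length, pvM_ends (pvFlag t m) t.length]
  have hfn : pvFlag t m t.length = false := pvFlag_top t m t.length (le_refl _)
  cases hc : (pvM (pvFlag t m) t.length).2 with
  | none =>
    simp [hfn, pvZip_map_fst_snd]
  | some s =>
    have hnpos : 0 < t.length := by
      have h2 := pvM_isSome (pvFlag t m) t.length; rw [hc] at h2; simp at h2; omega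
    have hcast : ((t.length : Int) - 1) = ((t.length - 1 : Nat) : Int) := by omega
    rw [List.zip_append (by simp)]
    simp [hfn, pvZip_map_fst_snd, hcast]
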